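-- pv_equiv track=rewrite | github.com/lieunmere-lang/stock-portfolio-website | backend/services/liquidity.py | _normalize_monthly
-- ===== SOURCE A (Python) =====
-- from typing import Any, Dict, List, Optional
--
-- def _normalize_monthly(series: List[Dict]) -> List[Dict]:
--     """일별 데이터를 월말 기준으로 리샘플링한다."""
--     if not series:
--         return []
--     monthly = {}
--     for item in series:
--         key = item["date"][:7]  # YYYY-MM
--         monthly[key] = item  # 마지막 값이 남음
--     return [{"date": k, "value": v["value"]} for k, v in sorted(monthly.items())]
-- ===== SOURCE B (Python) =====
-- def _normalize_monthly(series):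
--     """일별 데이터를 월말 기준으로 리샘플링한다."""
--     if not series:
--         return []
--     months = sorted({item["date"][:7] for item in series})
--     out = []
--     for k in months:
--         for item in reversed(series):
--             if item["date"][:7] == k:
--                 out.append({"date": k, "value": item["value"]})
--                 break
--     return out
-- ===== Notes on version B (the rewrite author's own statement) =====
-- stated objective: alternative
-- what changed: Replaces A's last-wins dict accumulation followed by sorting the dict items with: a sorted set of month keys, each resolved by a reverse scan of the input for the last item of that month.
import Mathlib
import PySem

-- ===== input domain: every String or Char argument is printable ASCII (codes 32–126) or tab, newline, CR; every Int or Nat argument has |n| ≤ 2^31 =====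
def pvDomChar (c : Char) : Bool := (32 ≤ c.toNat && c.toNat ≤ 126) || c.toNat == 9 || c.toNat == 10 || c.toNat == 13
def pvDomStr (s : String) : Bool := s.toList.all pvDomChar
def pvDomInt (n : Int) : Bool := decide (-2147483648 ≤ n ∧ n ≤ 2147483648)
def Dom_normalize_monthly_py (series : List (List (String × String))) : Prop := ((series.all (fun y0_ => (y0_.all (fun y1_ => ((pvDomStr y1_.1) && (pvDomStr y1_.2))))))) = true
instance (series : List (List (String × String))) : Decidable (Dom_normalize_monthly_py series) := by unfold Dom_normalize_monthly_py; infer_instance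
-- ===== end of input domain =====

-- B replaces A's last-wins dict accumulation + sort of its items by a sorted set of month keys,
-- each resolved by a reverse scan for the last item of that month (objective: alternative).

-- ===== PORT A =====
-- item["date"][:7] (both Pythons compute this sub-expression); "" default is dead under Pre_
def pvMonthKey (item : List (String × String)) : String :=
  PySem.Str.slice ((PySem.Dict.mk item).getD "date" "") none (some 7)

-- sorted(monthly.items()): the keys are distinct, so CPython's tuple comparison never reaches
-- the dict values; sorting the pairs by their first component is exact here.
def normalize_monthly_py (series : List (List (String × String))) : List (List (String × String)) :=
  if series = [] then []
  else
    let monthly := series.foldl (fun d item => d.insert (pvMonthKey item) item) PySem.Dict.empty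
    (PySem.List.sorted monthly.items (fun kv => kv.1)).map
      (fun kv => [("date", kv.1), ("value", (PySem.Dict.mk kv.2).getD "value" "")])

-- ===== PORT B =====
def normalize_monthly_py_alt (series : List (List (String × String))) : List (List (String × String)) :=
  if series = [] then []
  else
    let months := PySem.List.sorted (PySem.Set.ofList (series.map pvMonthKey)) (fun k => k)
    months.foldl (fun out k =>
      match series.reverse.find? (fun item => pvMonthKey item == k) with
      | some item => out ++ [[("date", k), ("value", (PySem.Dict.mk item).getD "value" "")]]
      | none => out) []

-- ===== PRECONDITION & SPEC =====
-- Exactly where the Python A returns: every item has a "date" key, and every item that is the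
-- last one of its month (the surviving dict value) has a "value" key (KeyError otherwise).
def Pre_normalize_monthly_py (series : List (List (String × String))) : Prop :=
  (∀ item ∈ series, (PySem.Dict.mk item).contains "date" = true) ∧
  (∀ i ∈ List.range series.length,
    (∀ j ∈ List.range series.length, i < j →
      pvMonthKey (series.getD j []) ≠ pvMonthKey (series.getD i [])) →
    (PySem.Dict.mk (series.getD i [])).contains "value" = true)
instance (series : List (List (String × String))) : Decidable (Pre_normalize_monthly_py series) := by
  unfold Pre_normalize_monthly_py; infer_instance

def pvWitness_normalize_monthly_py : (List (List (String × String))) :=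
  [[("date", "2024-01-05"), ("value", "10")],
   [("date", "2024-01-31"), ("value", "12")],
   [("date", "2024-02-01"), ("value", "7")]]

def Spec_normalize_monthly_py (series : List (List (String × String))) (out : List (List (String × String))) : Prop := out = normalize_monthly_py_alt series
instance (series : List (List (String × String))) (out : List (List (String × String))) : Decidable (Spec_normalize_monthly_py series out) := by unfold Spec_normalize_monthly_py; infer_instance

-- ===== CLAIM (what is proved, stated in full; the proofs are below) =====
def Claim_equal_normalize_monthly_py : Prop := ∀ (series : List (List (String × String))), Dom_normalize_monthly_py series → Pre_normalize_monthly_py series → Spec_normalize_monthly_py series (normalize_monthly_py series)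

-- ===== LEMMAS AND PROOFS =====

-- the last-wins dict lookup is the first hit of a reverse scan
theorem pv_foldl_insert_get? (l : List (List (String × String)))
    (d : PySem.Dict String (List (String × String))) (c : String) :
    (l.foldl (fun d a => d.insert (pvMonthKey a) a) d).get? c
      = (l.reverse.find? (fun a => pvMonthKey a == c)).or (d.get? c) := by
  induction l generalizing d with
  | nil => simp
  | cons x xs ih =>
    simp only [List.foldl_cons, ih, List.reverse_cons, List.find?_append, Option.or_assoc]
    congr 1
    by_cases h : c = pvMonthKey x
    · simp [h]
    · have h' : (pvMonthKey x == c) = false := by simp [Ne.symm h]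
      simp [PySem.Dict.get?_insert, h, h']

theorem pv_flatMap_eq_map {α β : Type} (l : List α) (g : α → List β) (h : α → β)
    (hg : ∀ k ∈ l, g k = [h k]) : l.flatMap g = l.map h := by
  induction l with
  | nil => simp
  | cons x xs ih =>
    simp only [List.flatMap_cons, List.map_cons, hg x (by simp)]
    rw [ih (fun k hk => hg k (by simp [hk]))]
    rfl

-- ===== VERDICT (by name: the statement is the Claim_ definition above) =====
theorem normalize_monthly_py_spec : Claim_equal_normalize_monthly_py := by
  intro series _ _
  unfold Spec_normalize_monthly_py normalize_monthly_py normalize_monthly_py_alt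
  by_cases hnil : series = []
  · simp [hnil]
  · simp only [if_neg hnil]
    set monthly := series.foldl (fun d item => d.insert (pvMonthKey item) item) PySem.Dict.empty with hmon
    set months := PySem.List.sorted (PySem.Set.ofList (series.map pvMonthKey)) (fun k => k) with hmonths
    have hkeys : monthly.keys = PySem.Set.ofList (series.map pvMonthKey) := by
      rw [hmon, PySem.Dict.keys_foldl_insert_key series pvMonthKey (fun _ x => x) PySem.Dict.empty]
      simp [PySem.Set.update_nil_left]
    have hnd : monthly.keys.Nodup := by
      rw [hkeys]; exact PySem.Set.nodup_ofList _
    -- A's sorted items = months paired with their dict values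
    have hperm : (months.map (fun k => (k, monthly.getD k []))).Perm monthly.items := by
      rw [PySem.Dict.items_eq_map_keys monthly hnd [], hkeys]
      exact List.Perm.map _ (PySem.List.sorted_perm _ _ _)
    have hsorted : PySem.List.sorted monthly.items (fun kv => kv.1)
        = months.map (fun k => (k, monthly.getD k [])) := by
      apply PySem.List.sorted_eq_of_perm_of_pairwise_lt _ _ _ hperm
      rw [List.pairwise_map]
      exact PySem.List.sorted_ofList_pairwise_lt (series.map pvMonthKey)
    -- dict lookup = reverse find
    have hget : ∀ k, monthly.getD k []
        = (series.reverse.find? (fun a => pvMonthKey a == k)).getD [] := by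
      intro k
      rw [PySem.Dict.getD_eq_get?_getD, hmon, pv_foldl_insert_get?]
      simp
    -- every month has a hit in the reverse scan
    have hfind : ∀ k ∈ months, ∃ a, series.reverse.find? (fun a => pvMonthKey a == k) = some a := by
      intro k hk
      rw [hmonths, PySem.List.mem_sorted] at hk
      have hk' : k ∈ series.map pvMonthKey := (PySem.Set.mem_ofList _ _).1 hk
      obtain ⟨a, ha, rfl⟩ := List.mem_map.1 hk'
      have : (series.reverse.find? (fun a' => pvMonthKey a' == pvMonthKey a)).isSome := by
        rw [List.find?_isSome]
        exact ⟨a, by simp [ha]⟩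
      exact Option.isSome_iff_exists.1 this
    -- B's fold is a flatMap, then a map
    have hsplit : (fun (out : List (List (String × String))) (k : String) =>
        match series.reverse.find? (fun item => pvMonthKey item == k) with
        | some item => out ++ [[("date", k), ("value", (PySem.Dict.mk item).getD "value" "")]]
        | none => out)
      = fun out k => out ++ (match series.reverse.find? (fun item => pvMonthKey item == k) with
        | some item => [[("date", k), ("value", (PySem.Dict.mk item).getD "value" "")]]
        | none => []) := by
      funext out k
      cases series.reverse.find? (fun item => pvMonthKey item == k) <;> simp
    rw [hsorted, List.map_map, hsplit, PySem.List.foldl_append_eq_flatMap, List.nil_append]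
    rw [pv_flatMap_eq_map _ _ (fun k =>
        [("date", k), ("value", (PySem.Dict.mk ((series.reverse.find? (fun a => pvMonthKey a == k)).getD [])).getD "value" "")])
        (by intro k hk; obtain ⟨a, ha⟩ := hfind k hk; simp [ha])]
    apply List.map_congr_left
    intro k hk
    simp only [Function.comp]
    rw [hget k]
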